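-- pv_equiv track=rewrite | github.com/Junghoo-developer/Anima | Core/pipeline/delivery_failures.py | clean_failure_missing_items
-- ===== SOURCE A (Python) =====
-- def _dedupe_keep_order(items):
--     seen = set()
--     result = []
--     for item in items:
--         normalized = str(item or "").strip()
--         if not normalized or normalized in seen:
--             continue
--         seen.add(normalized)
--         result.append(normalized)
--     return result
--
-- def clean_failure_missing_items(raw_slots: list[str] | None):
--     labels = {
--         "memory.referent_fact": "the specific remembered event being referenced",
--         "user.canonical_name": "the grounded identity fact being asked for",
--         "character.identity": "the character identity fact being asked for",
--         "character.fictionality": "whether the character is fictional or real",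
--         "character.relationship": "the relationship being asked about",
--         "story.narrative_fact": "the story fact being asked for",
--         "user.pattern_snapshot": "grounded observations about the visible pattern",
--         "system.failure_or_fix": "the concrete system failure or fix",
--         "current_goal_answer_seed": "usable evidence for the current answer",
--     }
--     cleaned = []
--     for raw in raw_slots or []:
--         text = str(raw or "").strip()
--         if not text:
--             continue
--         lowered = text.lower()
--         if lowered in labels:
--             cleaned.append(labels[lowered])
--             continue
--         if "." in text or "_" in text:
--             cleaned.append("usable evidence for the current answer")
--             continue
--         cleaned.append(text)
--     return _dedupe_keep_order(cleaned)[:5]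
-- ===== SOURCE B (Python) =====
-- def clean_failure_missing_items(raw_slots: list[str] | None):
--     labels = {
--         "memory.referent_fact": "the specific remembered event being referenced",
--         "user.canonical_name": "the grounded identity fact being asked for",
--         "character.identity": "the character identity fact being asked for",
--         "character.fictionality": "whether the character is fictional or real",
--         "character.relationship": "the relationship being asked about",
--         "story.narrative_fact": "the story fact being asked for",
--         "user.pattern_snapshot": "grounded observations about the visible pattern",
--         "system.failure_or_fix": "the concrete system failure or fix",
--         "current_goal_answer_seed": "usable evidence for the current answer",
--     }
--     seen = set()
--     result = []
--     for raw in raw_slots or []: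
--         text = raw.strip()
--         if not text:
--             continue
--         label = labels.get(text.lower())
--         if label is None:
--             if "." in text or "_" in text:
--                 label = "usable evidence for the current answer"
--             else:
--                 label = text
--         if label not in seen:
--             seen.add(label)
--             result.append(label)
--             if len(result) == 5:
--                 break
--     return result
-- ===== Notes on version B (the rewrite author's own statement) =====
-- stated objective: simpler
-- what changed: Replaces A's staged pipeline (map pass building an intermediate list, separate dedupe helper with its own re-strip, then a [:5] slice) with one fused early-terminating loop that maps each slot, dedupes on the mapped label inline via a seen set, and breaks as soon as 5 labels are collected.
import Mathlib
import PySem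

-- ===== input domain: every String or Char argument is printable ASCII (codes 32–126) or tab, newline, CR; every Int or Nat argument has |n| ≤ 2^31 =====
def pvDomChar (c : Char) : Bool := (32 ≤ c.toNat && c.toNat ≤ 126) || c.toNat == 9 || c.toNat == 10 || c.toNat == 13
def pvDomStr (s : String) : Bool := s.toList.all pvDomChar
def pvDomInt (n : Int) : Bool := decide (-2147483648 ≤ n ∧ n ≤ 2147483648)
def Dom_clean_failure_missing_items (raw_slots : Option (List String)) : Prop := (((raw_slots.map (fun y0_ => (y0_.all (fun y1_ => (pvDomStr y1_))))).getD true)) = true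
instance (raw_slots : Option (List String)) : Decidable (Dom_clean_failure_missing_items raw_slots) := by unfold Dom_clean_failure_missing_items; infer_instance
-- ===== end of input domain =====

-- B replaces A's staged pipeline (map pass, separate dedupe helper, [:5] slice) with one fused
-- early-terminating loop that dedupes mapped labels inline and stops at 5 (objective: simpler).

-- the slot-label table both Pythons write as the same dict literal
def pvLabelTable : List (String × String) := [
  ("memory.referent_fact", "the specific remembered event being referenced"),
  ("user.canonical_name", "the grounded identity fact being asked for"),
  ("character.identity", "the character identity fact being asked for"),
  ("character.fictionality", "whether the character is fictional or real"),
  ("character.relationship", "the relationship being asked about"),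
  ("story.narrative_fact", "the story fact being asked for"),
  ("user.pattern_snapshot", "grounded observations about the visible pattern"),
  ("system.failure_or_fix", "the concrete system failure or fix"),
  ("current_goal_answer_seed", "usable evidence for the current answer")]

-- ===== PORT A =====
def pvDedupeKeepOrder (items : List String) : List String :=
  (items.foldl
    (fun (st : PySem.Set String × List String) item =>
      let normalized := PySem.Str.strip (if item = "" then "" else item)
      if normalized = "" ∨ PySem.Set.contains st.1 normalized then st
      else (PySem.Set.add st.1 normalized, st.2 ++ [normalized]))
    (PySem.Set.empty, [])).2

def clean_failure_missing_items (raw_slots : Option (List String)) : List String :=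
  let labels : PySem.Dict String String := PySem.Dict.mk pvLabelTable
  let cleaned := (raw_slots.getD []).foldl
    (fun cleaned raw =>
      let text := PySem.Str.strip (if raw = "" then "" else raw)
      if text = "" then cleaned
      else
        let lowered := PySem.Str.lower text
        match labels.get? lowered with
        | some v => cleaned ++ [v]
        | none =>
          if PySem.Str.isIn "." text || PySem.Str.isIn "_" text then
            cleaned ++ ["usable evidence for the current answer"]
          else cleaned ++ [text]) []
  PySem.List.slice (pvDedupeKeepOrder cleaned) none (some 5)

-- ===== PORT B =====
def pvCollectLabels (labels : PySem.Dict String String) (seen : PySem.Set String)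
    (result : List String) : List String → List String
  | [] => result
  | raw :: rest =>
    let text := PySem.Str.strip raw
    if text = "" then pvCollectLabels labels seen result rest
    else
      let label :=
        match labels.get? (PySem.Str.lower text) with
        | some v => v
        | none =>
          if PySem.Str.isIn "." text || PySem.Str.isIn "_" text then
            "usable evidence for the current answer"
          else text
      if PySem.Set.contains seen label then pvCollectLabels labels seen result rest
      else
        let result' := result ++ [label]
        if result'.length = 5 then result'
        else pvCollectLabels labels (PySem.Set.add seen label) result' rest

def clean_failure_missing_items_alt (raw_slots : Option (List String)) : List String :=
  pvCollectLabels (PySem.Dict.mk pvLabelTable) PySem.Set.empty [] (raw_slots.getD [])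

-- ===== PRECONDITION & SPEC =====
def Spec_clean_failure_missing_items (raw_slots : Option (List String)) (out : List String) : Prop := out = clean_failure_missing_items_alt raw_slots
instance (raw_slots : Option (List String)) (out : List String) : Decidable (Spec_clean_failure_missing_items raw_slots out) := by unfold Spec_clean_failure_missing_items; infer_instance

-- ===== CLAIM (what is proved, stated in full; the proofs are below) =====
def Claim_equal_clean_failure_missing_items : Prop := ∀ (raw_slots : Option (List String)), Dom_clean_failure_missing_items raw_slots → Spec_clean_failure_missing_items raw_slots (clean_failure_missing_items raw_slots)

-- ===== LEMMAS AND PROOFS =====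

-- the per-slot mapping both programs apply (none = the slot is skipped)
def pvMapSlot (raw : String) : Option String :=
  let text := PySem.Str.strip raw
  if text = "" then none
  else some (match (PySem.Dict.mk pvLabelTable).get? (PySem.Str.lower text) with
    | some v => v
    | none =>
      if PySem.Str.isIn "." text || PySem.Str.isIn "_" text then
        "usable evidence for the current answer"
      else text)

-- "stable" strings: stripping is a no-op and the string is nonempty
def pvStable (s : String) : Prop := PySem.Str.strip s = s ∧ s ≠ ""

-- plain ordered dedup with an explicit seen set (the shape A's helper reduces to on stable items)
def pvDD (seen : PySem.Set String) (acc : List String) : List String → List String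
  | [] => acc
  | x :: xs =>
    if PySem.Set.contains seen x then pvDD seen acc xs
    else pvDD (PySem.Set.add seen x) (acc ++ [x]) xs

-- fused dedup-and-take-5 (the shape B's loop reduces to on the mapped list)
def pvFT (seen : PySem.Set String) (acc : List String) : List String → List String
  | [] => acc
  | x :: xs =>
    if PySem.Set.contains seen x then pvFT seen acc xs
    else
      let acc' := acc ++ [x]
      if acc'.length = 5 then acc' else pvFT (PySem.Set.add seen x) acc' xs

theorem pv_strip_idem (s : List Char) :
    PySem.Chars.strip (PySem.Chars.strip s) = PySem.Chars.strip s := by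
  simp only [PySem.Chars.strip, PySem.Chars.lstrip, PySem.Chars.rstrip]
  set p := PySem.Chars.isspace with hp
  have ht : List.dropWhile p (List.dropWhile p s) = List.dropWhile p s :=
    List.dropWhile_idempotent p s
  set t := List.dropWhile p s with htdef
  set u := List.dropWhile p t.reverse with hu
  have h1 : List.dropWhile p u.reverse = u.reverse := by
    have hpre : u.reverse <+: t := by
      have := (List.dropWhile_suffix (l := t.reverse) p).reverse
      simpa [hu] using this
    rw [List.dropWhile_eq_self_iff]
    intro hl
    have hlen : 0 < t.length := lt_of_lt_of_le hl hpre.length_le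
    have hget : u.reverse[0]'hl = t[0]'hlen := hpre.getElem hl
    rw [hget]
    exact (List.dropWhile_eq_self_iff.mp ht) hlen
  rw [h1, List.reverse_reverse, hu, List.dropWhile_idempotent]

theorem pv_strip_idem_str (s : String) :
    PySem.Str.strip (PySem.Str.strip s) = PySem.Str.strip s := by
  apply String.toList_inj.mp
  simp [pv_strip_idem]

theorem pv_get?_mk_mem {k v : String} :
    ∀ (l : List (String × String)), (PySem.Dict.mk l).get? k = some v → (k, v) ∈ l
  | [] => by intro h; simp [PySem.Dict.get?] at h
  | (a, b) :: rest => by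
    rw [PySem.Dict.get?_mk_cons]
    intro h
    by_cases hk : a = k
    · simp [hk] at h
      simp [hk, h]
    · simp [hk] at h
      exact List.mem_cons_of_mem _ (pv_get?_mk_mem rest h)

theorem pv_mapSlot_stable (raw v : String) (h : pvMapSlot raw = some v) : pvStable v := by
  unfold pvMapSlot at h
  by_cases h0 : PySem.Str.strip raw = ""
  · simp [h0] at h
  · simp only [h0, if_false] at h
    rcases hm : (PySem.Dict.mk pvLabelTable).get? (PySem.Str.lower (PySem.Str.strip raw)) with _ | w
    · rw [hm] at h
      simp only [Option.some.injEq] at h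
      split at h
      · rw [← h]; exact ⟨by decide, by decide⟩
      · rw [← h]
        exact ⟨pv_strip_idem_str raw, h0⟩
    · rw [hm] at h
      simp only [Option.some.injEq] at h
      subst h
      have hmem := pv_get?_mk_mem _ hm
      simp only [pvLabelTable, List.mem_cons, List.not_mem_nil, or_false,
        Prod.mk.injEq] at hmem
      rcases hmem with ⟨_, hw⟩ | ⟨_, hw⟩ | ⟨_, hw⟩ | ⟨_, hw⟩ | ⟨_, hw⟩ | ⟨_, hw⟩ | ⟨_, hw⟩ | ⟨_, hw⟩ | ⟨_, hw⟩ <;>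
        subst hw <;> exact ⟨by decide, by decide⟩

-- A's cleaning loop is filterMap pvMapSlot
theorem pv_a_fold (l : List String) (acc : List String) :
    l.foldl
      (fun cleaned raw =>
        let text := PySem.Str.strip (if raw = "" then "" else raw)
        if text = "" then cleaned
        else
          let lowered := PySem.Str.lower text
          match (PySem.Dict.mk pvLabelTable).get? lowered with
          | some v => cleaned ++ [v]
          | none =>
            if PySem.Str.isIn "." text || PySem.Str.isIn "_" text then
              cleaned ++ ["usable evidence for the current answer"]
            else cleaned ++ [text]) acc
    = acc ++ l.filterMap pvMapSlot := by
  induction l generalizing acc with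
  | nil => simp
  | cons x xs ih =>
    rw [List.foldl_cons, List.filterMap_cons, ih]
    have hsx : PySem.Str.strip (if x = "" then "" else x) = PySem.Str.strip x := by
      split
      · simp_all
      · rfl
    simp only [hsx]
    unfold pvMapSlot
    by_cases h0 : PySem.Str.strip x = ""
    · simp [h0]
    · simp only [h0, if_false]
      rcases hm : (PySem.Dict.mk pvLabelTable).get? (PySem.Str.lower (PySem.Str.strip x)) with _ | w
      · by_cases hd : PySem.Chars.isIn ['.'] (PySem.Chars.strip x.toList) = true ∨
            PySem.Chars.isIn ['_'] (PySem.Chars.strip x.toList) = true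
        · simp [hd]
        · simp [hd]
      · simp

-- A's dedupe helper on stable items is pvDD
theorem pv_dedupe_eq (l : List String) (s : PySem.Set String) (a : List String)
    (hl : ∀ x ∈ l, pvStable x) :
    (l.foldl
      (fun (st : PySem.Set String × List String) item =>
        let normalized := PySem.Str.strip (if item = "" then "" else item)
        if normalized = "" ∨ PySem.Set.contains st.1 normalized then st
        else (PySem.Set.add st.1 normalized, st.2 ++ [normalized])) (s, a)).2
    = pvDD s a l := by
  induction l generalizing s a with
  | nil => rfl
  | cons x xs ih =>
    obtain ⟨hx1, hx2⟩ := hl x (List.mem_cons_self)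
    have hrest : ∀ y ∈ xs, pvStable y := fun y hy => hl y (List.mem_cons_of_mem _ hy)
    rw [List.foldl_cons]
    have hnorm : PySem.Str.strip (if x = "" then "" else x) = x := by
      rw [if_neg hx2, hx1]
    unfold pvDD
    simp only [hnorm]
    simp only [hx2, false_or]
    by_cases hc : PySem.Set.contains s x = true
    · simp only [hc, if_true]
      exact ih _ _ hrest
    · simp only [hc]
      exact ih _ _ hrest

-- B's loop is pvFT over the mapped list
theorem pv_b_eq (l : List String) (s : PySem.Set String) (a : List String) :
    pvCollectLabels (PySem.Dict.mk pvLabelTable) s a l = pvFT s a (l.filterMap pvMapSlot) := by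
  induction l generalizing s a with
  | nil => rfl
  | cons x xs ih =>
    by_cases h0 : PySem.Str.strip x = ""
    · have hm0 : pvMapSlot x = none := by simp [pvMapSlot, h0]
      simp only [List.filterMap_cons, hm0]
      unfold pvCollectLabels
      rw [if_pos h0]
      exact ih s a
    · set L := (match (PySem.Dict.mk pvLabelTable).get? (PySem.Str.lower (PySem.Str.strip x)) with
        | some v => v
        | none =>
          if PySem.Str.isIn "." (PySem.Str.strip x) || PySem.Str.isIn "_" (PySem.Str.strip x) then
            "usable evidence for the current answer"
          else PySem.Str.strip x) with hL
      have hms : pvMapSlot x = some L := by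
        unfold pvMapSlot
        rw [if_neg h0, hL]
      simp only [List.filterMap_cons, hms]
      unfold pvCollectLabels pvFT
      rw [if_neg h0, ← hL]
      by_cases hc : PySem.Set.contains s L = true
      · rw [if_pos hc, if_pos hc]
        exact ih s a
      · rw [if_neg hc, if_neg hc]
        by_cases h5 : (a ++ [L]).length = 5
        · rw [if_pos h5, if_pos h5]
        · rw [if_neg h5, if_neg h5]
          exact ih _ _

theorem pv_dd_append (l : List String) (s : PySem.Set String) (a : List String) :
    ∃ r, pvDD s a l = a ++ r := by
  induction l generalizing s a with
  | nil => exact ⟨[], by simp [pvDD]⟩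
  | cons x xs ih =>
    unfold pvDD
    split
    · exact ih s a
    · obtain ⟨r, hr⟩ := ih (PySem.Set.add s x) (a ++ [x])
      exact ⟨x :: r, by simp [hr]⟩

theorem pv_ft_take (l : List String) (s : PySem.Set String) (a : List String)
    (ha : a.length < 5) : pvFT s a l = (pvDD s a l).take 5 := by
  induction l generalizing s a with
  | nil =>
    unfold pvFT pvDD
    exact (List.take_of_length_le (by omega)).symm
  | cons x xs ih =>
    unfold pvFT pvDD
    split
    · exact ih s a ha
    · by_cases h5 : (a ++ [x]).length = 5
      · simp only [h5, if_true]
        obtain ⟨r, hr⟩ := pv_dd_append xs (PySem.Set.add s x) (a ++ [x])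
        rw [hr, List.take_append, List.take_of_length_le (by omega), h5]
        simp
      · simp only [h5, if_false]
        exact ih _ _ (by simp at h5 ⊢; omega)

theorem pv_slice5 (l : List String) : PySem.List.slice l none (some 5) = l.take 5 := by
  rw [PySem.List.slice_to l (by norm_num)]
  rfl

-- ===== VERDICT (by name: the statement is the Claim_ definition above) =====
theorem clean_failure_missing_items_spec : Claim_equal_clean_failure_missing_items := by
  intro raw_slots _
  unfold Spec_clean_failure_missing_items
  unfold clean_failure_missing_items clean_failure_missing_items_alt pvDedupeKeepOrder
  have hst : ∀ x ∈ (raw_slots.getD []).filterMap pvMapSlot, pvStable x := by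
    intro x hx
    simp only [List.mem_filterMap] at hx
    obtain ⟨r, _, hr⟩ := hx
    exact pv_mapSlot_stable r x hr
  simp only [pv_b_eq, pv_a_fold, List.nil_append, pv_dedupe_eq _ _ _ hst, pv_slice5]
  exact (pv_ft_take _ _ _ (by simp)).symm
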